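-- pv_equiv track=rewrite | github.com/mariopam2064/edu1 | projectop/small_project/module.py | alarm_check
-- ===== SOURCE A (Python) =====
-- def substitution(city='seoul',response = False):
--     en_city = ["seoul","anyang","yongin","goyang","chuncheon"]
--     ko_city = ['서울','안양','용인','고양','춘천']
--     dict = {}
--     for i in range(5):
--         dict[en_city[i]] = ko_city[i]
--     if response:
--         return dict
--     else:
--         return dict[city]
--
-- def alarm_check(temp_dict):
--     alarm= [] #리스트에 알람 저장
--     issue = False
--     for key, value in temp_dict.items():
--         value = value[0]
--         key = substitution(key)
--         if value >= 25 and value <30 :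
--             alarm.append(f"{key}의 현재 온도가 야외 활동 하기 좋은 날씨에요")
--         elif value >= 30 and value <33 :
--             issue= True
--             alarm.append(f"{key}의 현재 온도가 30도가 넘어요 조심하세요")
--         elif value >= 33 and value <35:
--             alarm.append(f"{key}의 현재 온도가 33도가 넘어요. 장시간 야외 활동은 위험합니다.")
--             issue = True
--         elif value >= 35 :
--             alarm.append(f"{key}의 현재온도가 35도가 넘어요 조심하세요. 너무 더워요. 실내에서 휴식하고 야외활동은 자제하세요")
--             issue  = True
--     return issue, alarm
-- ===== SOURCE B (Python) =====
-- _KO = {"seoul": "서울", "anyang": "안양", "yongin": "용인",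
--        "goyang": "고양", "chuncheon": "춘천"}
--
-- # Upper temperature bands, lowest threshold first: (threshold, message suffix, sets issue).
-- _BANDS = [
--     (25, "의 현재 온도가 야외 활동 하기 좋은 날씨에요", False),
--     (30, "의 현재 온도가 30도가 넘어요 조심하세요", True),
--     (33, "의 현재 온도가 33도가 넘어요. 장시간 야외 활동은 위험합니다.", True),
--     (35, "의 현재온도가 35도가 넘어요 조심하세요. 너무 더워요. 실내에서 휴식하고 야외활동은 자제하세요", True),
-- ]
--
--
-- def alarm_check(temp_dict):
--     alarm = []
--     issue = False
--     for key, values in temp_dict.items():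
--         v = values[0]
--         band = sum(1 for t, _, _ in _BANDS if v >= t)  # 0 = below 25: no message
--         if band:
--             _, suffix, flag = _BANDS[band - 1]
--             alarm.append(_KO[key] + suffix)
--             issue = issue or flag
--     return issue, alarm
-- ===== Notes on version B (the rewrite author's own statement) =====
-- stated objective: alternative
-- what changed: Replaces the four-branch elif chain and the helper that rebuilds the city-translation dict on every iteration with a module-level band table (threshold, message suffix, issue flag) indexed by counting exceeded thresholds, and a module-level translation dict.
import Mathlib
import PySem

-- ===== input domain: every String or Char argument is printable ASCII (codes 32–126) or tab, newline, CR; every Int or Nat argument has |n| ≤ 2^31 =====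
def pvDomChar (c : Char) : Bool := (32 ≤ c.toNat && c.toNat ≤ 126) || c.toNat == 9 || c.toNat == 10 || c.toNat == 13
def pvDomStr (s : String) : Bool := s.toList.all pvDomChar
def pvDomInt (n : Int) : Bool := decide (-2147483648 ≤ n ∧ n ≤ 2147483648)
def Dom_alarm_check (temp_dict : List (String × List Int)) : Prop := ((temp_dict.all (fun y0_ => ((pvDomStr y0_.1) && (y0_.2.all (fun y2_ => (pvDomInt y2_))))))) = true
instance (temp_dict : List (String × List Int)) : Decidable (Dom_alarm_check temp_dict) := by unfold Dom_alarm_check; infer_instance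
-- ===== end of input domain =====

-- B replaces A's elif chain and per-iteration dict-building helper with module-level
-- band/translation tables indexed by counting exceeded thresholds (alternative, same cost).


-- ===== PORT A =====
-- substitution(city) with response=False: builds the en→ko dict by a range(5) loop, then looks city up
-- (Option: none exactly where Python raises KeyError).
def substitutionA (city : String) : Option String :=
  let en_city : List String := ["seoul", "anyang", "yongin", "goyang", "chuncheon"]
  let ko_city : List String := ["서울", "안양", "용인", "고양", "춘천"]
  let d : PySem.Dict String String :=
    (PySem.List.pyRange 0 5 1).foldl (fun d i =>
      match PySem.List.pyGet? en_city i, PySem.List.pyGet? ko_city i with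
      | some k, some v => d.insert k v
      | _, _ => d) PySem.Dict.empty   -- indices 0..4 are always in range; the match is a totality guard
  d.get? city

-- one iteration of A's loop; state none = an exception was raised (value[0] or the dict lookup)
def alarmStepA (acc : Option (Bool × List String)) (kv : String × List Int) : Option (Bool × List String) :=
  match acc with
  | none => none
  | some (issue, alarm) =>
    match PySem.List.pyGet? kv.2 0, substitutionA kv.1 with
    | some value, some key =>
      if 25 ≤ value ∧ value < 30 then
        some (issue, alarm ++ [key ++ "의 현재 온도가 야외 활동 하기 좋은 날씨에요"])
      else if 30 ≤ value ∧ value < 33 then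
        some (true, alarm ++ [key ++ "의 현재 온도가 30도가 넘어요 조심하세요"])
      else if 33 ≤ value ∧ value < 35 then
        some (true, alarm ++ [key ++ "의 현재 온도가 33도가 넘어요. 장시간 야외 활동은 위험합니다."])
      else if 35 ≤ value then
        some (true, alarm ++ [key ++ "의 현재온도가 35도가 넘어요 조심하세요. 너무 더워요. 실내에서 휴식하고 야외활동은 자제하세요"])
      else some (issue, alarm)
    | _, _ => none

def alarm_check (temp_dict : List (String × List Int)) : Bool × List String :=
  (temp_dict.foldl alarmStepA (some (false, []))).getD (false, [])

-- ===== PORT B =====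
def pvKoDict : PySem.Dict String String :=
  PySem.Dict.ofList [("seoul", "서울"), ("anyang", "안양"), ("yongin", "용인"),
                     ("goyang", "고양"), ("chuncheon", "춘천")]

def pvBands : List (Int × String × Bool) :=
  [(25, "의 현재 온도가 야외 활동 하기 좋은 날씨에요", false),
   (30, "의 현재 온도가 30도가 넘어요 조심하세요", true),
   (33, "의 현재 온도가 33도가 넘어요. 장시간 야외 활동은 위험합니다.", true),
   (35, "의 현재온도가 35도가 넘어요 조심하세요. 너무 더워요. 실내에서 휴식하고 야외활동은 자제하세요", true)]

-- one iteration of B's loop; state none = an exception was raised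
def alarmStepB (acc : Option (Bool × List String)) (kv : String × List Int) : Option (Bool × List String) :=
  match acc with
  | none => none
  | some (issue, alarm) =>
    match PySem.List.pyGet? kv.2 0 with
    | none => none
    | some v =>
      -- band = sum(1 for t, _, _ in _BANDS if v >= t)
      let band : Int := (pvBands.map (fun b => if b.1 ≤ v then (1 : Int) else 0)).sum
      if band = 0 then some (issue, alarm)
      else
        match PySem.List.pyGet? pvBands (band - 1), pvKoDict.get? kv.1 with
        | some b, some ko => some (issue || b.2.2, alarm ++ [ko ++ b.2.1])
        | _, _ => none

def alarm_check_alt (temp_dict : List (String × List Int)) : Bool × List String :=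
  (temp_dict.foldl alarmStepB (some (false, []))).getD (false, [])

-- ===== PRECONDITION & SPEC =====
-- Pre_ excludes inputs on which A raises (a key outside the five known cities → KeyError in
-- substitution; an empty temperature list → IndexError on value[0]) and association lists with
-- duplicate keys, which a Python dict cannot represent (dict construction collapses duplicates,
-- so A's behaviour there is an artefact of the representation, not of A).
def Pre_alarm_check (temp_dict : List (String × List Int)) : Prop :=
  (temp_dict.map Prod.fst).Nodup ∧
  ∀ kv ∈ temp_dict, kv.1 ∈ ["seoul", "anyang", "yongin", "goyang", "chuncheon"] ∧ kv.2 ≠ []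
instance (temp_dict : List (String × List Int)) : Decidable (Pre_alarm_check temp_dict) := by
  unfold Pre_alarm_check; infer_instance

def pvWitness_alarm_check : (List (String × List Int)) :=
  [("seoul", [26]), ("goyang", [35, 2]), ("anyang", [12])]

def Spec_alarm_check (temp_dict : List (String × List Int)) (out : Bool × List String) : Prop := out = alarm_check_alt temp_dict
instance (temp_dict : List (String × List Int)) (out : Bool × List String) : Decidable (Spec_alarm_check temp_dict out) := by unfold Spec_alarm_check; infer_instance

-- ===== CLAIM (what is proved, stated in full; the proofs are below) =====
def Claim_equal_alarm_check : Prop := ∀ (temp_dict : List (String × List Int)), Dom_alarm_check temp_dict → Pre_alarm_check temp_dict → Spec_alarm_check temp_dict (alarm_check temp_dict)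

-- ===== LEMMAS AND PROOFS =====

-- the two loop bodies agree on every admitted entry
lemma step_eq (k : String) (vs : List Int)
    (hk : k ∈ ["seoul", "anyang", "yongin", "goyang", "chuncheon"]) (hv : vs ≠ [])
    (acc : Option (Bool × List String)) :
    alarmStepA acc (k, vs) = alarmStepB acc (k, vs) := by
  cases acc with
  | none => rfl
  | some p =>
    obtain ⟨issue, alarm⟩ := p
    obtain ⟨v, rest, rfl⟩ := List.exists_cons_of_ne_nil hv
    have hget : PySem.List.pyGet? (v :: rest) 0 = some v := by
      simp [PySem.List.pyGet?, PySem.List.pyIdx?]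
    have hko : ∃ ko : String, substitutionA k = some ko ∧ pvKoDict.get? k = some ko := by
      fin_cases hk
      · exact ⟨"서울", by decide, by decide⟩
      · exact ⟨"안양", by decide, by decide⟩
      · exact ⟨"용인", by decide, by decide⟩
      · exact ⟨"고양", by decide, by decide⟩
      · exact ⟨"춘천", by decide, by decide⟩
    obtain ⟨ko, hA, hB⟩ := hko
    simp only [alarmStepA, alarmStepB, hget, hA, hB]
    by_cases h25 : (25 : Int) ≤ v
    · by_cases h30 : (30 : Int) ≤ v
      · by_cases h33 : (33 : Int) ≤ v
        · by_cases h35 : (35 : Int) ≤ v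
          · simp [pvBands, h25, h30, h33, h35, show ¬ v < 30 by omega, show ¬ v < 33 by omega,
                  show ¬ v < 35 by omega, PySem.List.pyGet?, PySem.List.pyIdx?]
          · simp [pvBands, h25, h30, h33, h35, show ¬ v < 30 by omega, show ¬ v < 33 by omega,
                  show v < 35 by omega, PySem.List.pyGet?, PySem.List.pyIdx?]
        · simp [pvBands, h25, h30, h33, show ¬ (35 : Int) ≤ v by omega, show ¬ v < 30 by omega,
                show v < 33 by omega, PySem.List.pyGet?, PySem.List.pyIdx?]
      · simp [pvBands, h25, h30, show ¬ (33 : Int) ≤ v by omega, show ¬ (35 : Int) ≤ v by omega,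
              show v < 30 by omega, PySem.List.pyGet?, PySem.List.pyIdx?]
    · simp [pvBands, h25, show ¬ (30 : Int) ≤ v by omega, show ¬ (33 : Int) ≤ v by omega,
            show ¬ (35 : Int) ≤ v by omega]

-- ===== VERDICT (by name: the statement is the Claim_ definition above) =====
theorem alarm_check_spec : Claim_equal_alarm_check := by
  intro temp_dict _ hpre
  unfold Spec_alarm_check alarm_check alarm_check_alt
  congr 1
  apply PySem.List.foldl_congr_mem
  intro acc kv hkv
  obtain ⟨k, vs⟩ := kv
  exact step_eq k vs (hpre.2 _ hkv).1 (hpre.2 _ hkv).2 acc
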